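-- pv_equiv track=rewrite | github.com/ckrr/EmoContext | main.py | getWordsTurn
-- ===== SOURCE A (Python) =====
-- def getWordsCell(cell):
--     return list(word.lower() for word in cell.split())
--
-- def scrapePunctuation(word):
--     newWord=""
--     punctuation=[]
--     for char in word:
--         if (char.isalpha()):
--             newWord+=char
--         else:
--             punctuation.append(char)
--     return [newWord,punctuation]
--
-- def getWordsTurn(wordTurn):
--     wordsTurn=[]
--     words=getWordsCell(wordTurn)
--     for word in words:
--         [newWord,punctuation]=scrapePunctuation(word)
--         if (len(newWord)>0):
--             wordsTurn.append(newWord)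
--         for punc in punctuation:
--             wordsTurn.append(punc)
--     return wordsTurn
-- ===== SOURCE B (Python) =====
-- def getWordsTurn(wordTurn):
--     out = []
--     letters = ""
--     punct = []
--     for ch in wordTurn:
--         if ch.isspace():
--             if letters:
--                 out.append(letters)
--             out.extend(punct)
--             letters = ""
--             punct = []
--         else:
--             ch = ch.lower()
--             if ch.isalpha():
--                 letters += ch
--             else:
--                 punct.append(ch)
--     if letters:
--         out.append(letters)
--     out.extend(punct)
--     return out
-- ===== Notes on version B (the rewrite author's own statement) =====
-- stated objective: alternative
-- what changed: Replaces split()-into-words plus a per-word scrape helper (two passes building intermediate word lists) with a single one-pass state machine over the string that flushes a letters accumulator and a punctuation list at each whitespace run.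
import Mathlib
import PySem

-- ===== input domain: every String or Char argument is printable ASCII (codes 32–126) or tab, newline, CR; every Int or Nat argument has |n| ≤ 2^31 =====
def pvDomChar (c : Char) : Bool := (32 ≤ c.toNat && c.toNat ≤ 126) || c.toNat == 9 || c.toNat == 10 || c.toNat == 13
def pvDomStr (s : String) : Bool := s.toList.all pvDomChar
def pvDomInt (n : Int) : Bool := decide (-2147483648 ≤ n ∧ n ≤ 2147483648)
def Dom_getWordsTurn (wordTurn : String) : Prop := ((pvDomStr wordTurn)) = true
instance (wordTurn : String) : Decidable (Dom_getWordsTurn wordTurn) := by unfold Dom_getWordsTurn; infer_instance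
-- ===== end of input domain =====

-- B replaces A's split-then-scrape two-stage tokenizer with a single-pass state machine; same results, similar cost (objective: alternative).

-- ===== PORT A =====
-- A's helper scrapePunctuation (Python builds the letters string and punctuation list char by char)
def pyScrapePunctuation (word : List Char) : List Char × List Char :=
  word.foldl (fun st c =>
    if PySem.Chars.isalpha c then (st.1 ++ [c], st.2) else (st.1, st.2 ++ [c])) ([], [])

-- A's helper getWordsCell: split on whitespace, lowercase each word
def pyGetWordsCell (cell : String) : List String :=
  (PySem.Str.split₀ cell).map PySem.Str.lower

def getWordsTurn (wordTurn : String) : List String :=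
  (pyGetWordsCell wordTurn).foldl (fun acc w =>
    let p := pyScrapePunctuation w.toList
    p.2.foldl (fun a punc => a ++ [String.ofList [punc]])
      (if 0 < p.1.length then acc ++ [String.ofList p.1] else acc)) []

-- ===== PORT B =====
-- B's per-character state machine step: state = (output, pending letters, pending punctuation strings)
def altStep (st : List String × List Char × List String) (ch : Char) :
    List String × List Char × List String :=
  if PySem.Chars.isspace ch then
    ((if st.2.1.isEmpty then st.1 else st.1 ++ [String.ofList st.2.1]) ++ st.2.2, [], [])
  else
    let c := PySem.Chars.lowerChar ch
    if PySem.Chars.isalpha c then (st.1, st.2.1 ++ [c], st.2.2)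
    else (st.1, st.2.1, st.2.2 ++ [String.ofList [c]])

def getWordsTurn_alt (wordTurn : String) : List String :=
  let st := wordTurn.toList.foldl altStep ([], [], [])
  (if st.2.1.isEmpty then st.1 else st.1 ++ [String.ofList st.2.1]) ++ st.2.2

-- ===== PRECONDITION & SPEC =====
def Spec_getWordsTurn (wordTurn : String) (out : List String) : Prop := out = getWordsTurn_alt wordTurn
instance (wordTurn : String) (out : List String) : Decidable (Spec_getWordsTurn wordTurn out) := by unfold Spec_getWordsTurn; infer_instance

-- ===== CLAIM (what is proved, stated in full; the proofs are below) =====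
def Claim_equal_getWordsTurn : Prop := ∀ (wordTurn : String), Dom_getWordsTurn wordTurn → Spec_getWordsTurn wordTurn (getWordsTurn wordTurn)

-- ===== LEMMAS AND PROOFS =====

-- flush a pending token: the letters string (if nonempty) followed by the punctuation strings
def pvFlush (out : List String) (letters : List Char) (punct : List String) : List String :=
  (if letters.isEmpty then out else out ++ [String.ofList letters]) ++ punct

-- A's per-word body, expressed with pvFlush
def pvProc (acc : List String) (w : List Char) : List String :=
  let p := pyScrapePunctuation (PySem.Chars.lower w)
  pvFlush acc p.1 (p.2.map (fun c => String.ofList [c]))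

theorem pv_A_eq (s : String) :
    getWordsTurn s = (PySem.Chars.split₀ s.toList).foldl pvProc [] := by
  unfold getWordsTurn pyGetWordsCell
  rw [PySem.Str.split₀, List.map_map, List.foldl_map]
  congr 1
  funext acc w
  simp only [pvProc, pvFlush, PySem.List.foldl_append_singleton_eq_map]
  cases h : (pyScrapePunctuation (PySem.Chars.lower w)).1 <;> simp [h]

theorem pv_go_acc (cs : List Char) : ∀ (curR : List Char) (accWs : List (List Char)),
    PySem.Chars.split₀.go cs curR accWs =
      accWs.reverse ++ PySem.Chars.split₀.go cs curR [] := by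
  induction cs with
  | nil =>
    intro curR accWs
    simp only [PySem.Chars.split₀.go]
    split_ifs <;> simp
  | cons c cs ih =>
    intro curR accWs
    simp only [PySem.Chars.split₀.go]
    split_ifs with h1 h2
    · exact ih [] accWs
    · rw [ih [] (curR.reverse :: accWs), ih [] [curR.reverse]]
      simp
    · exact ih (c :: curR) accWs

theorem pv_main (cs : List Char) : ∀ (cur : List Char) (out : List String),
    pvFlush
      (cs.foldl altStep (out, (pyScrapePunctuation (PySem.Chars.lower cur)).1,
        (pyScrapePunctuation (PySem.Chars.lower cur)).2.map (fun c => String.ofList [c]))).1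
      (cs.foldl altStep (out, (pyScrapePunctuation (PySem.Chars.lower cur)).1,
        (pyScrapePunctuation (PySem.Chars.lower cur)).2.map (fun c => String.ofList [c]))).2.1
      (cs.foldl altStep (out, (pyScrapePunctuation (PySem.Chars.lower cur)).1,
        (pyScrapePunctuation (PySem.Chars.lower cur)).2.map (fun c => String.ofList [c]))).2.2
    = (PySem.Chars.split₀.go cs cur.reverse []).foldl pvProc out := by
  induction cs with
  | nil =>
    intro cur out
    simp only [List.foldl_nil, PySem.Chars.split₀.go]
    cases hc : cur with
    | nil => simp [pvFlush, pyScrapePunctuation, PySem.Chars.lower]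
    | cons x xs =>
      rw [if_neg (by simp)]
      simp [pvProc]
  | cons c cs ih =>
    intro cur out
    by_cases hs : PySem.Chars.isspace c
    · -- whitespace: flush
      have hstep : altStep (out, (pyScrapePunctuation (PySem.Chars.lower cur)).1,
          (pyScrapePunctuation (PySem.Chars.lower cur)).2.map (fun c => String.ofList [c]))
          c = (pvFlush out (pyScrapePunctuation (PySem.Chars.lower cur)).1
                ((pyScrapePunctuation (PySem.Chars.lower cur)).2.map (fun c => String.ofList [c])), [], []) := by
        simp [altStep, hs, pvFlush]
      rw [List.foldl_cons, hstep]
      have h0 : ([] : List Char) = (pyScrapePunctuation (PySem.Chars.lower ([] : List Char))).1 := by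
        simp [pyScrapePunctuation, PySem.Chars.lower]
      have h0' : ([] : List String) = (pyScrapePunctuation (PySem.Chars.lower ([] : List Char))).2.map (fun c => String.ofList [c]) := by
        simp [pyScrapePunctuation, PySem.Chars.lower]
      rw [show ((pvFlush out (pyScrapePunctuation (PySem.Chars.lower cur)).1
                ((pyScrapePunctuation (PySem.Chars.lower cur)).2.map (fun c => String.ofList [c])), ([] : List Char), ([] : List String)))
            = (pvFlush out (pyScrapePunctuation (PySem.Chars.lower cur)).1
                ((pyScrapePunctuation (PySem.Chars.lower cur)).2.map (fun c => String.ofList [c])),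
               (pyScrapePunctuation (PySem.Chars.lower ([] : List Char))).1,
               (pyScrapePunctuation (PySem.Chars.lower ([] : List Char))).2.map (fun c => String.ofList [c])) from by rw [← h0, ← h0']]
      rw [ih []]
      simp only [PySem.Chars.split₀.go, hs, if_pos]
      cases hc : cur with
      | nil =>
        rw [if_pos (by simp)]
        simp [pvFlush, pyScrapePunctuation, PySem.Chars.lower]
      | cons x xs =>
        rw [if_neg (by simp)]
        simp only [List.reverse_nil, List.reverse_reverse]
        rw [pv_go_acc cs [] [x :: xs]]
        simp [pvProc]
    · -- non-space: accumulate lowered char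
      have hl : PySem.Chars.lower (cur ++ [c]) = PySem.Chars.lower cur ++ [PySem.Chars.lowerChar c] := by
        simp [PySem.Chars.lower]
      have hstep : altStep (out, (pyScrapePunctuation (PySem.Chars.lower cur)).1,
          (pyScrapePunctuation (PySem.Chars.lower cur)).2.map (fun c => String.ofList [c]))
          c = (out, (pyScrapePunctuation (PySem.Chars.lower (cur ++ [c]))).1,
               (pyScrapePunctuation (PySem.Chars.lower (cur ++ [c]))).2.map (fun c => String.ofList [c])) := by
        rw [hl]
        unfold pyScrapePunctuation
        rw [List.foldl_append]
        simp only [List.foldl_cons, List.foldl_nil]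
        by_cases ha : PySem.Chars.isalpha (PySem.Chars.lowerChar c)
        · simp [altStep, hs, ha]
        · simp [altStep, hs, ha]
      rw [List.foldl_cons, hstep, ih (cur ++ [c])]
      simp only [PySem.Chars.split₀.go, hs]
      rw [if_neg (by simp)]
      simp

-- ===== VERDICT (by name: the statement is the Claim_ definition above) =====
theorem getWordsTurn_spec : Claim_equal_getWordsTurn := by
  intro s _
  unfold Spec_getWordsTurn
  rw [pv_A_eq]
  have h := pv_main s.toList [] []
  simp only [pyScrapePunctuation, PySem.Chars.lower, List.map_nil, List.foldl_nil,
    List.reverse_nil] at h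
  rw [PySem.Chars.split₀, ← h]
  rfl
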